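-- pv_equiv track=rewrite | github.com/arthur-thuy/qde-ordinality | src/discretizer/discretizer.py | _get_bin_indices_outer
-- ===== SOURCE A (Python) =====
-- def _get_bin_indices_outer(bins: int) -> list:
--     """Get bin indices for a symmetric binning scheme where outer bins are largest.
--
--     Parameters
--     ----------
--     bins : int
--         Number of bins.
--
--     Returns
--     -------
--     list
--         List of bin indices, with largest values at the edges.
--     """
--     if bins <= 0:
--         raise ValueError("Number of bins must be a positive integer.")
--
--     half_bins = bins // 2
--     # Create reversed widths starting from largest at the edges
--     widths = [half_bins - i for i in range(half_bins)]
--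
--     if bins % 2 == 0:
--         # Even number of bins
--         widths = widths + widths[::-1]
--     else:
--         # Odd number of bins
--         widths = widths + [0] + widths[::-1]  # 0 for smallest bin in middle
--
--     return widths
-- ===== SOURCE B (Python) =====
-- def _get_bin_indices_outer(bins: int) -> list:
--     """Get bin indices for a symmetric binning scheme where outer bins are largest."""
--     if bins <= 0:
--         raise ValueError("Number of bins must be a positive integer.")
--     half = bins // 2
--     return [half - min(i, bins - 1 - i) for i in range(bins)]
-- ===== Notes on version B (the rewrite author's own statement) =====
-- stated objective: simpler
-- what changed: Replaces the half-list build plus parity branch, reversal and concatenation with a single pass computing each width directly from its distance to the nearer edge (half - min(i, bins-1-i)).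
import Mathlib
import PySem

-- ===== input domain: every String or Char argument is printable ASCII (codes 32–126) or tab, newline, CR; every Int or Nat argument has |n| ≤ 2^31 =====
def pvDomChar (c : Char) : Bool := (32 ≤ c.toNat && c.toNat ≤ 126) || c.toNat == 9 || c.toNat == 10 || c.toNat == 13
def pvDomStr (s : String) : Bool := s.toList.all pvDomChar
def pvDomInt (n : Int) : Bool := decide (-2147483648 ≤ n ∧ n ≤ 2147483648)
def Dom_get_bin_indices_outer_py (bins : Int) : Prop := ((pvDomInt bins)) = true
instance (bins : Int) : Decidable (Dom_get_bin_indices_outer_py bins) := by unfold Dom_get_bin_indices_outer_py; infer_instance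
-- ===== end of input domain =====

-- B replaces A's half-list + parity branch + reversal + concatenation by a single pass
-- computing each width from its distance to the nearer edge (simpler; return value only).

-- ===== PORT A =====
def get_bin_indices_outer_py (bins : Int) : List Int :=
  let half_bins := PySem.Int.floordiv bins 2
  let widths := (PySem.List.pyRange 0 half_bins 1).map (fun i => half_bins - i)
  if PySem.Int.mod bins 2 = 0 then
    widths ++ widths.reverse
  else
    widths ++ [0] ++ widths.reverse

-- ===== PORT B =====
def get_bin_indices_outer_py_alt (bins : Int) : List Int :=
  let half := PySem.Int.floordiv bins 2
  (PySem.List.pyRange 0 bins 1).map (fun i => half - min i (bins - 1 - i))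

-- ===== PRECONDITION & SPEC =====
-- A raises ValueError exactly when bins ≤ 0; Pre_ admits all positive bins.
def Pre_get_bin_indices_outer_py (bins : Int) : Prop := 1 ≤ bins
instance (bins : Int) : Decidable (Pre_get_bin_indices_outer_py bins) := by unfold Pre_get_bin_indices_outer_py; infer_instance
def pvWitness_get_bin_indices_outer_py : Int := (5)

def Spec_get_bin_indices_outer_py (bins : Int) (out : List Int) : Prop := out = get_bin_indices_outer_py_alt bins
instance (bins : Int) (out : List Int) : Decidable (Spec_get_bin_indices_outer_py bins out) := by unfold Spec_get_bin_indices_outer_py; infer_instance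

-- ===== CLAIM (what is proved, stated in full; the proofs are below) =====
def Claim_equal_get_bin_indices_outer_py : Prop := ∀ (bins : Int), Dom_get_bin_indices_outer_py bins → Pre_get_bin_indices_outer_py bins → Spec_get_bin_indices_outer_py bins (get_bin_indices_outer_py bins)

-- ===== LEMMAS AND PROOFS =====

theorem get_bin_indices_outer_main (bins : Int) (hb : 1 ≤ bins) :
    get_bin_indices_outer_py bins = get_bin_indices_outer_py_alt bins := by
  have h2 : (0:Int) < 2 := by omega
  have hfd : PySem.Int.floordiv bins 2 = bins / 2 := PySem.Int.floordiv_eq_ediv_of_pos h2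
  have hmd : PySem.Int.mod bins 2 = bins % 2 := PySem.Int.mod_eq_emod_of_pos h2
  apply List.ext_getElem
  · simp only [get_bin_indices_outer_py, get_bin_indices_outer_py_alt, hfd, hmd]
    split_ifs with hpar <;>
      simp only [List.length_append, List.length_reverse, List.length_map,
        PySem.List.length_pyRange_one, List.length_cons, List.length_nil] <;>
      omega
  · intro k hk hk'
    simp only [get_bin_indices_outer_py, get_bin_indices_outer_py_alt, hfd, hmd] at hk hk' ⊢
    simp only [List.length_map, PySem.List.length_pyRange_one] at hk hk'
    rw [List.getElem_map, PySem.List.getElem_pyRange_one]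
    by_cases hpar : bins % 2 = 0
    · simp only [if_pos hpar] at hk ⊢
      simp only [List.length_append, List.length_reverse, List.length_map,
        PySem.List.length_pyRange_one] at hk
      rw [List.getElem_append]
      split
      · rename_i hlt
        simp only [List.length_map, PySem.List.length_pyRange_one] at hlt
        rw [List.getElem_map, PySem.List.getElem_pyRange_one]
        omega
      · rename_i hge
        simp only [List.length_map, PySem.List.length_pyRange_one] at hge
        rw [List.getElem_reverse, List.getElem_map, PySem.List.getElem_pyRange_one]
        simp only [List.length_map, PySem.List.length_pyRange_one]
        omega
    · simp only [if_neg hpar] at hk ⊢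
      simp only [List.length_append, List.length_reverse, List.length_map,
        PySem.List.length_pyRange_one, List.length_cons, List.length_nil] at hk
      rw [List.getElem_append]
      split
      · rename_i hlt
        simp only [List.length_append, List.length_map,
          PySem.List.length_pyRange_one, List.length_cons, List.length_nil] at hlt
        rw [List.getElem_append]
        split
        · rename_i hlt2
          simp only [List.length_map, PySem.List.length_pyRange_one] at hlt2
          rw [List.getElem_map, PySem.List.getElem_pyRange_one]
          omega
        · rename_i hge2
          simp only [List.length_map, PySem.List.length_pyRange_one] at hge2
          rw [List.getElem_singleton]
          omega
      · rename_i hge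
        simp only [List.length_append, List.length_map,
          PySem.List.length_pyRange_one, List.length_cons, List.length_nil] at hge
        rw [List.getElem_reverse, List.getElem_map, PySem.List.getElem_pyRange_one]
        simp only [List.length_append, List.length_map,
          PySem.List.length_pyRange_one, List.length_cons, List.length_nil]
        omega

-- ===== VERDICT (by name: the statement is the Claim_ definition above) =====
theorem get_bin_indices_outer_py_spec : Claim_equal_get_bin_indices_outer_py := by
  intro bins _ hpre
  unfold Spec_get_bin_indices_outer_py
  exact get_bin_indices_outer_main bins hpre
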